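-- pv_equiv track=rewrite | github.com/CharlotteS34/advent-of-code-2023 | Day1/get-calibration-value.py | find_first_digit_match
-- ===== SOURCE A (Python) =====
-- def find_first_digit_match(text, digits):
--     digits_list = digits.keys()
--     for i, char in enumerate(text):
--         if (char.isdigit()):
--             return str(char)
--         text_to_check = text[0:i+1]
--         digit_matches = [d for d in digits_list if d in text_to_check]
--         if (len(digit_matches) > 0):
--             digit_match = digit_matches[0]
--             return digits[digit_match]
--     return ""
-- ===== SOURCE B (Python) =====
-- def find_first_digit_match(text, digits):
--     # One pass: at each position, test keys ending exactly there instead of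
--     # re-scanning the whole prefix for every key.
--     for i in range(len(text)):
--         c = text[i]
--         if c.isdigit():
--             return c
--         for d in digits:
--             L = len(d)
--             if L <= i + 1 and text[i + 1 - L:i + 1] == d:
--                 return digits[d]
--     return ""
-- ===== Notes on version B (the rewrite author's own statement) =====
-- stated objective: alternative
-- what changed: Instead of re-scanning the whole growing prefix with a substring search for every key at every position (building the list of all matching keys), B makes a single left-to-right pass and, at each non-digit position, checks only whether a key ends exactly at that position via one length-bounded slice comparison per key.
import Mathlib
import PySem

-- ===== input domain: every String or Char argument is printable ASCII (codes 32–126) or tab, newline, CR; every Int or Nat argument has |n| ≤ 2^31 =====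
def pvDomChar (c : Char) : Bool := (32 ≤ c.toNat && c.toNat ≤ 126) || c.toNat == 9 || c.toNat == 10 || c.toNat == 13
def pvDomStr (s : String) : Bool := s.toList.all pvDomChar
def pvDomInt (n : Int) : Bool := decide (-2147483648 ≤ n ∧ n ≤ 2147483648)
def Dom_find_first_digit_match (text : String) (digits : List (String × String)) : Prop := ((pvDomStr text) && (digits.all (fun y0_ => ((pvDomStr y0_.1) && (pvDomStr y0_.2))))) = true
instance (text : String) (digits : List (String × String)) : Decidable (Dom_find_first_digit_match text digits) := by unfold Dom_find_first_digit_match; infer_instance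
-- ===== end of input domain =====

-- B replaces A's per-position substring re-scan of the whole growing prefix by a
-- single pass that tests only the keys ending exactly at the current position.


-- ===== PORT A =====
-- A's loop: 'for i, char in enumerate(text)' carried as (index i, remaining characters)
def ffdmA_go (d : PySem.Dict String String) (cs : List Char) : Nat → List Char → String
  | _, [] => ""
  | i, c :: rest =>
    if PySem.Chars.isdigit c then String.ofList [c]       -- str(char)
    else
      let text_to_check := PySem.List.slice cs (some 0) (some ((i + 1 : Nat) : Int))  -- text[0:i+1]
      match d.keys.filter (fun k => PySem.Chars.isIn k.toList text_to_check) with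
      | m :: _ => d.getD m ""                         -- digits[digit_matches[0]]; m is a key, default unused
      | [] => ffdmA_go d cs (i + 1) rest

def find_first_digit_match (text : String) (digits : List (String × String)) : String :=
  ffdmA_go (PySem.Dict.ofList digits) text.toList 0 text.toList

-- ===== PORT B =====
-- 'L <= i + 1 and text[i+1-L:i+1] == d' (the guard makes the Nat subtraction exact)
def ffdmB_ends (cs : List Char) (i : Nat) (k : String) : Bool :=
  decide (k.toList.length ≤ i + 1) &&
    decide (PySem.List.slice cs (some ((i + 1 - k.toList.length : Nat) : Int))
              (some ((i + 1 : Nat) : Int)) = k.toList)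

def ffdmB_go (d : PySem.Dict String String) (cs : List Char) : Nat → List Char → String
  | _, [] => ""
  | i, c :: rest =>
    if PySem.Chars.isdigit c then String.ofList [c]
    else
      match d.keys.find? (ffdmB_ends cs i) with       -- 'for d in digits: if … return digits[d]'
      | some m => d.getD m ""
      | none => ffdmB_go d cs (i + 1) rest

def find_first_digit_match_alt (text : String) (digits : List (String × String)) : String :=
  ffdmB_go (PySem.Dict.ofList digits) text.toList 0 text.toList

-- ===== PRECONDITION & SPEC =====
def Spec_find_first_digit_match (text : String) (digits : List (String × String)) (out : String) : Prop := out = find_first_digit_match_alt text digits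
instance (text : String) (digits : List (String × String)) (out : String) : Decidable (Spec_find_first_digit_match text digits out) := by unfold Spec_find_first_digit_match; infer_instance

-- ===== CLAIM (what is proved, stated in full; the proofs are below) =====
def Claim_equal_find_first_digit_match : Prop := ∀ (text : String) (digits : List (String × String)), Dom_find_first_digit_match text digits → Spec_find_first_digit_match text digits (find_first_digit_match text digits)

-- ===== LEMMAS AND PROOFS =====

-- a key occurs in text[0:i+1] but not in text[0:i]  ↔  it ends exactly at position i
lemma infix_take_succ_iff (cs k : List Char) (i : Nat) (hi : i < cs.length)
    (H : k ≠ [] → ¬ k <:+: cs.take i) :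
    (k <:+: cs.take (i + 1)) ↔
      (k.length ≤ i + 1 ∧ (cs.drop (i + 1 - k.length)).take k.length = k) := by
  rcases eq_or_ne k [] with rfl | hk
  · simp
  · have hlen : (cs.take (i + 1)).length = i + 1 := by
      rw [List.length_take]; omega
    constructor
    · intro hinf
      have hsuf : k <:+ cs.take (i + 1) := by
        obtain ⟨s, t, hst⟩ := hinf
        cases t with
        | nil => exact ⟨s, by simpa using hst⟩
        | cons a t' =>
          exfalso
          apply H hk
          have hpre : s ++ k <+: cs.take (i + 1) := ⟨a :: t', by simpa using hst⟩
          have hle : (s ++ k).length ≤ i := by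
            have hlst := congrArg List.length hst
            simp only [List.length_append, List.length_cons, hlen] at hlst
            simp only [List.length_append]
            omega
          have hpre' : s ++ k <+: cs.take i := by
            have h1 : s ++ k <+: (cs.take (i + 1)).take i :=
              List.prefix_take_iff.2 ⟨hpre, hle⟩
            rwa [List.take_take, min_eq_left (by omega)] at h1
          exact ((List.suffix_append s k).isInfix).trans hpre'.isInfix
      have hL : k.length ≤ i + 1 := by
        have := hsuf.length_le
        omega
      have heq := List.suffix_iff_eq_drop.1 hsuf
      rw [hlen, List.drop_take,
        show i + 1 - (i + 1 - k.length) = k.length from by omega] at heq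
      exact ⟨hL, heq.symm⟩
    · rintro ⟨hL, heq⟩
      have hsplit : cs.take (i + 1) =
          cs.take (i + 1 - k.length) ++ (cs.drop (i + 1 - k.length)).take k.length := by
        conv_lhs => rw [show i + 1 = (i + 1 - k.length) + k.length from by omega]
        exact List.take_add
      exact List.IsSuffix.isInfix ⟨cs.take (i + 1 - k.length), by rw [hsplit, heq]⟩

-- the per-key predicates of the two ports agree at a reached position
lemma pred_eq (cs : List Char) (k : String) (i : Nat) (hi : i < cs.length)
    (H : k.toList ≠ [] → ¬ k.toList <:+: cs.take i) :
    PySem.Chars.isIn k.toList (PySem.List.slice cs (some 0) (some ((i + 1 : Nat) : Int)))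
      = ffdmB_ends cs i k := by
  have hslice0 : PySem.List.slice cs (some 0) (some ((i + 1 : Nat) : Int)) = cs.take (i + 1) := by
    rw [PySem.List.slice_zero_start, PySem.List.slice_to_natCast]
  unfold ffdmB_ends
  rw [hslice0, PySem.List.slice_natCast, Bool.eq_iff_iff]
  simp only [Bool.and_eq_true, decide_eq_true_eq]
  rw [PySem.Chars.isIn_iff_infix, infix_take_succ_iff cs k.toList i hi H]
  constructor <;> rintro ⟨h1, h2⟩ <;>
    refine ⟨h1, ?_⟩ <;>
    [rwa [show i + 1 - (i + 1 - k.toList.length) = k.toList.length from by omega];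
     rwa [show i + 1 - (i + 1 - k.toList.length) = k.toList.length from by omega] at h2]

-- the two loops agree from any reached state
lemma go_eq (d : PySem.Dict String String) (cs : List Char) :
    ∀ (rest : List Char) (i : Nat), cs.drop i = rest →
    (∀ k ∈ d.keys, k.toList ≠ [] → ¬ k.toList <:+: cs.take i) →
    ffdmA_go d cs i rest = ffdmB_go d cs i rest := by
  intro rest
  induction rest with
  | nil => intro i _ _; rfl
  | cons c rest ih =>
    intro i hdrop hinv
    have hi : i < cs.length := by
      by_contra h
      rw [List.drop_eq_nil_of_le (by omega)] at hdrop
      simp at hdrop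
    have hfilt : d.keys.filter
        (fun k => PySem.Chars.isIn k.toList
          (PySem.List.slice cs (some 0) (some ((i + 1 : Nat) : Int))))
        = d.keys.filter (ffdmB_ends cs i) := by
      apply List.filter_congr
      intro k hk
      exact pred_eq cs k i hi (hinv k hk)
    have hdrop' : cs.drop (i + 1) = rest := by
      have h1 := congrArg (List.drop 1) hdrop
      simpa [List.drop_drop, Nat.add_comm] using h1
    simp only [ffdmA_go, ffdmB_go]
    by_cases hd : PySem.Chars.isdigit c
    · simp [hd]
    · simp only [hd, Bool.false_eq_true, if_false]
      rw [hfilt, ← List.head?_filter]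
      rcases hfl : d.keys.filter (ffdmB_ends cs i) with _ | ⟨m, ms⟩
      · simp only [List.head?_nil]
        apply ih (i + 1) hdrop'
        intro k hk hknil
        have hpB : ffdmB_ends cs i k = false := by
          rcases Bool.eq_false_or_eq_true (ffdmB_ends cs i k) with h | h
          · exact absurd (List.mem_filter.2 ⟨hk, h⟩) (by rw [hfl]; simp)
          · exact h
        have hA : PySem.Chars.isIn k.toList
            (PySem.List.slice cs (some 0) (some ((i + 1 : Nat) : Int))) = false := by
          rw [pred_eq cs k i hi (hinv k hk)]; exact hpB
        rw [PySem.List.slice_zero_start, PySem.List.slice_to_natCast] at hA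
        exact (PySem.Chars.isIn_eq_false_iff _ _).1 hA
      · simp only [List.head?_cons]

-- ===== VERDICT (by name: the statement is the Claim_ definition above) =====
theorem find_first_digit_match_spec : Claim_equal_find_first_digit_match := by
  intro text digits _
  unfold Spec_find_first_digit_match find_first_digit_match find_first_digit_match_alt
  apply go_eq _ _ text.toList 0 rfl
  intro k _ hknil
  simp only [List.take_zero]
  rw [List.infix_nil]
  exact hknil
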